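-- pv_equiv track=rewrite | github.com/MaksimOrlov583/CallCenterIntelligence | utils.py | count_emotion_sequences
-- ===== SOURCE A (Python) =====
-- from typing import List, Dict, Any
--
-- def count_emotion_sequences(emotions: List[str], target_emotions: List[str], min_length: int = 2) -> int:
--     """
--     Подсчитывает последовательности целевых эмоций длиной не менее min_length.
--
--     Аргументы:
--         emotions (List[str]): Список эмоций
--         target_emotions (List[str]): Список эмоций для подсчета
--         min_length (int): Минимальная длина последовательности
--
--     Возвращает:
--         int: Количество последовательностей
--     """
--     count = 0
--     current_streak = 0
--
--     for emotion in emotions: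
--         if emotion in target_emotions:
--             current_streak += 1
--         else:
--             if current_streak >= min_length:
--                 count += 1
--             current_streak = 0
--
--     # Проверка, закончились ли мы последовательностью
--     if current_streak >= min_length:
--         count += 1
--
--     return count
-- ===== SOURCE B (Python) =====
-- def count_emotion_sequences(emotions, target_emotions, min_length=2):
--     bits = ''.join('1' if e in target_emotions else '0' for e in emotions)
--     return sum(1 for run in bits.split('0') if len(run) >= min_length)
-- ===== Notes on version B (the rewrite author's own statement) =====
-- stated objective: idiomatic
-- what changed: Replaces the streak accumulator and end-of-loop flush with a declarative pipeline: build a '0'/'1' membership string with join, split it on '0' (Python split keeps the final run naturally), and count the pieces of length >= min_length.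
import Mathlib
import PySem

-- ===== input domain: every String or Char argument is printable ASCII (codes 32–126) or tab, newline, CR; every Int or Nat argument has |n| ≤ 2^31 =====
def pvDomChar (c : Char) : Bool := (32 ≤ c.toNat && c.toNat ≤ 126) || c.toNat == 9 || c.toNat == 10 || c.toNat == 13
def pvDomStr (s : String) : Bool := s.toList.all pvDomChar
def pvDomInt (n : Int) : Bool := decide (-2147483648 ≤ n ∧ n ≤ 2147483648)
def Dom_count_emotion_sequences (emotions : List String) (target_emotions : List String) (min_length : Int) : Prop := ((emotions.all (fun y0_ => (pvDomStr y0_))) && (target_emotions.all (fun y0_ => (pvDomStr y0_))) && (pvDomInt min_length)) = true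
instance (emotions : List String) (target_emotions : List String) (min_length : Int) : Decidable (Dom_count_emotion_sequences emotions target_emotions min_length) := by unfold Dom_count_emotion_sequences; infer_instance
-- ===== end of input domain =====

-- B rebuilds the answer idiomatically: a '0'/'1' membership string, split on '0', count the pieces
-- of length ≥ min_length; no streak accumulator, no end-of-loop flush (objective: idiomatic/simpler).

-- ===== PORT A =====
-- A's loop carries (count, current_streak); the trailing 'if' is the end-of-loop flush.
def count_emotion_sequences (emotions : List String) (target_emotions : List String) (min_length : Int) : Int :=
  let st := emotions.foldl (fun (st : Int × Int) emotion =>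
      if target_emotions.contains emotion then
        (st.1, st.2 + 1)
      else
        ((if min_length ≤ st.2 then st.1 + 1 else st.1), 0))
    ((0 : Int), (0 : Int))
  if min_length ≤ st.2 then st.1 + 1 else st.1

-- ===== PORT B =====
-- ''.join(...) → PySem.Chars.join [] on code-point lists; bits.split('0') → PySem.Chars.splitOn
-- (sep ≠ "", Python's empty-piece-keeping split); len(run) is the piece's length (ASCII, exact).
def count_emotion_sequences_alt (emotions : List String) (target_emotions : List String) (min_length : Int) : Int :=
  let bits := PySem.Chars.join [] (emotions.map (fun e => if target_emotions.contains e then ['1'] else ['0']))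
  (PySem.Chars.splitOn bits ['0']).foldl
    (fun acc run => if min_length ≤ (run.length : Int) then acc + 1 else acc) 0

-- ===== PRECONDITION & SPEC =====
def Spec_count_emotion_sequences (emotions : List String) (target_emotions : List String) (min_length : Int) (out : Int) : Prop := out = count_emotion_sequences_alt emotions target_emotions min_length
instance (emotions : List String) (target_emotions : List String) (min_length : Int) (out : Int) : Decidable (Spec_count_emotion_sequences emotions target_emotions min_length out) := by unfold Spec_count_emotion_sequences; infer_instance

-- ===== CLAIM (what is proved, stated in full; the proofs are below) =====
def Claim_equal_count_emotion_sequences : Prop := ∀ (emotions : List String) (target_emotions : List String) (min_length : Int), Dom_count_emotion_sequences emotions target_emotions min_length → Spec_count_emotion_sequences emotions target_emotions min_length (count_emotion_sequences emotions target_emotions min_length)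

-- ===== LEMMAS AND PROOFS =====

-- Pieces of a '0'-split, structurally: split on the char '0', keeping empty pieces (Python split semantics).
def pvSplit0 : List Char → List (List Char)
  | [] => [[]]
  | c :: rest =>
      if c = '0' then [] :: pvSplit0 rest
      else
        match pvSplit0 rest with
        | [] => [[c]]
        | h :: t => (c :: h) :: t

lemma pvSplit0_ne_nil (l : List Char) : pvSplit0 l ≠ [] := by
  cases l with
  | nil => simp [pvSplit0]
  | cons c rest =>
      simp only [pvSplit0]
      split
      · simp
      · cases h : pvSplit0 rest <;> simp

def pvConsHead (p : List Char) : List (List Char) → List (List Char)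
  | [] => [p]
  | h :: t => (p ++ h) :: t

lemma pv_go_eq : ∀ (fuel : Nat) (l cur : List Char) (acc : List (List Char)),
    l.length ≤ fuel →
    PySem.Chars.splitOn.go ['0'] fuel l cur acc
      = acc.reverse ++ pvConsHead cur.reverse (pvSplit0 l) := by
  intro fuel
  induction fuel with
  | zero =>
      intro l cur acc h
      have hl : l = [] := by
        cases l <;> simp_all
      subst hl
      simp [PySem.Chars.splitOn.go, pvSplit0, pvConsHead]
  | succ f ih =>
      intro l cur acc h
      cases l with
      | nil => simp [PySem.Chars.splitOn.go, pvSplit0, pvConsHead]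
      | cons c rest =>
          by_cases hc : c = '0'
          · subst hc
            rw [show PySem.Chars.splitOn.go ['0'] (f+1) ('0' :: rest) cur acc
                  = PySem.Chars.splitOn.go ['0'] f rest [] (cur.reverse :: acc) from by
                simp [PySem.Chars.splitOn.go, List.isPrefixOf]]
            rw [ih rest [] (cur.reverse :: acc) (by simpa using Nat.le_of_succ_le_succ h)]
            rcases h0 : pvSplit0 rest with _ | ⟨p, ps⟩
            · exact absurd h0 (pvSplit0_ne_nil rest)
            · simp [pvSplit0, pvConsHead, h0]
          · rw [show PySem.Chars.splitOn.go ['0'] (f+1) (c :: rest) cur acc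
                  = PySem.Chars.splitOn.go ['0'] f rest (c :: cur) acc from by
                simp [PySem.Chars.splitOn.go, List.isPrefixOf]
                intro h; exact absurd h.symm hc]
            rw [ih rest (c :: cur) acc (by simpa using Nat.le_of_succ_le_succ h)]
            rcases h0 : pvSplit0 rest with _ | ⟨p, ps⟩
            · exact absurd h0 (pvSplit0_ne_nil rest)
            · simp [pvSplit0, pvConsHead, h0, hc]

lemma pv_splitOn_zero (s : List Char) :
    PySem.Chars.splitOn s ['0'] = pvSplit0 s := by
  rw [PySem.Chars.splitOn, pv_go_eq (s.length + 1) s [] [] (Nat.le_succ _)]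
  rcases h0 : pvSplit0 s with _ | ⟨p, ps⟩
  · exact absurd h0 (pvSplit0_ne_nil s)
  · simp [pvConsHead]

-- Plain count of pieces of length ≥ m.
def pvCountPlain (m : Int) : List (List Char) → Int
  | [] => 0
  | h :: t => (if m ≤ (h.length : Int) then 1 else 0) + pvCountPlain m t

-- Count with an extra k chars credited to the head piece (A's streak already in progress).
def pvCountAug (m k : Int) : List (List Char) → Int
  | [] => 0
  | h :: t => (if m ≤ k + (h.length : Int) then 1 else 0) + pvCountPlain m t

lemma pvCountAug_zero (m : Int) (ps : List (List Char)) :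
    pvCountAug m 0 ps = pvCountPlain m ps := by
  cases ps <;> simp [pvCountAug, pvCountPlain]

lemma pv_foldl_count (m : Int) : ∀ (ps : List (List Char)) (a : Int),
    ps.foldl (fun acc run => if m ≤ (run.length : Int) then acc + 1 else acc) a
      = a + pvCountPlain m ps := by
  intro ps
  induction ps with
  | nil => intro a; simp [pvCountPlain]
  | cons h t ih =>
      intro a
      simp only [List.foldl_cons, pvCountPlain, ih]
      split <;> ring

-- The one-char-per-emotion bit.
def pvBit (target_emotions : List String) (e : String) : Char :=
  if target_emotions.contains e then '1' else '0'

def pvFlush (m : Int) (st : Int × Int) : Int := if m ≤ st.2 then st.1 + 1 else st.1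

lemma pv_main (m : Int) (tg : List String) : ∀ (es : List String) (count streak : Int),
    pvFlush m (es.foldl (fun (st : Int × Int) emotion =>
        if tg.contains emotion then (st.1, st.2 + 1)
        else ((if m ≤ st.2 then st.1 + 1 else st.1), 0)) (count, streak))
      = count + pvCountAug m streak (pvSplit0 (es.map (pvBit tg))) := by
  intro es
  induction es with
  | nil =>
      intro count streak
      simp [pvFlush, pvSplit0, pvCountAug, pvCountPlain]
      split <;> ring
  | cons e rest ih =>
      intro count streak
      rw [List.foldl_cons, List.map_cons]
      by_cases hm : tg.contains e = true
      · rw [if_pos hm]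
        rw [show ((count, streak).1, (count, streak).2 + 1) = (count, streak + 1) from rfl]
        rw [ih count (streak + 1)]
        rw [show pvBit tg e = '1' from by unfold pvBit; rw [if_pos hm]]
        rcases h0 : pvSplit0 (rest.map (pvBit tg)) with _ | ⟨p, ps⟩
        · exact absurd h0 (pvSplit0_ne_nil _)
        · rw [show pvSplit0 ('1' :: rest.map (pvBit tg)) = ('1' :: p) :: ps from by
            simp [pvSplit0, h0]]
          simp only [pvCountAug, List.length_cons]
          have : streak + 1 + (p.length : Int) = streak + ((p.length : Int) + 1) := by ring
          rw [this]
          push_cast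
          ring_nf
      · rw [if_neg hm]
        rw [show ((if m ≤ (count, streak).2 then (count, streak).1 + 1 else (count, streak).1), (0:Int)) = ((if m ≤ streak then count + 1 else count), 0) from rfl]
        rw [ih (if m ≤ streak then count + 1 else count) 0]
        rw [show pvBit tg e = '0' from by unfold pvBit; rw [if_neg hm]]
        rw [show pvSplit0 ('0' :: rest.map (pvBit tg)) = [] :: pvSplit0 (rest.map (pvBit tg)) from by
            simp [pvSplit0]]
        rw [pvCountAug_zero]
        rcases h0 : pvSplit0 (rest.map (pvBit tg)) with _ | ⟨p, ps⟩
        · exact absurd h0 (pvSplit0_ne_nil _)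
        · simp only [pvCountAug, pvCountPlain, List.length_nil, Nat.cast_zero, add_zero]
          split <;> ring

lemma pv_bits_eq (tg : List String) (es : List String) :
    PySem.Chars.join [] (es.map (fun e => if tg.contains e then ['1'] else ['0']))
      = es.map (pvBit tg) := by
  have : es.map (fun e => if tg.contains e then ['1'] else ['0'])
      = (es.map (pvBit tg)).map (fun c => [c]) := by
    simp only [List.map_map]
    refine List.map_congr_left ?_
    intro e _
    by_cases h : e ∈ tg <;> simp [pvBit, h]
  rw [this]
  exact PySem.Chars.join_nil_singletons _

-- ===== VERDICT (by name: the statement is the Claim_ definition above) =====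
theorem count_emotion_sequences_spec : Claim_equal_count_emotion_sequences := by
  intro emotions target_emotions min_length _
  unfold Spec_count_emotion_sequences
  unfold count_emotion_sequences count_emotion_sequences_alt
  dsimp only
  rw [pv_bits_eq, pv_splitOn_zero, pv_foldl_count]
  rw [show (0 : Int) + pvCountPlain min_length (pvSplit0 (emotions.map (pvBit target_emotions)))
      = 0 + pvCountAug min_length 0 (pvSplit0 (emotions.map (pvBit target_emotions))) from by
    rw [pvCountAug_zero]]
  exact pv_main min_length target_emotions emotions 0 0
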